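-- pv_equiv track=rewrite | github.com/rcghpge/modular | mojo/stdlib/scripts/gen_grapheme_break_tables.py | compress_to_range_starts
-- ===== SOURCE A (Python) =====
-- def compress_to_range_starts(
--     ranges: list[tuple[int, int, int]],
-- ) -> tuple[list[int], list[int]]:
--     """Convert sorted, non-overlapping (start, end, value) ranges to change-points.
--
--     Requires the input to be sorted by start codepoint with no overlaps
--     (which the UCD data files guarantee).
--
--     Returns two parallel lists:
--     - starts: sorted list of codepoints where the property value changes
--     - values: the new property value at each change-point
--
--     For lookup, binary search starts to find which range a codepoint falls in.
--     Between explicit ranges, the value is Other (0).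
--     """
--     starts: list[int] = []
--     values: list[int] = []
--     prev_val = 0  # implicit starting value is Other
--     prev_end = -1
--
--     for start, end, val in ranges:
--         assert start > prev_end, f"Overlapping range at U+{start:04X}"
--
--         # Insert an Other gap marker after the previous range if needed
--         if start > prev_end + 1 and prev_val != 0:
--             starts.append(prev_end + 1)
--             values.append(0)
--             prev_val = 0
--
--         # Emit a new entry if the value changes (merges adjacent same-value)
--         if val != prev_val:
--             starts.append(start)
--             values.append(val)
--             prev_val = val
--
--         prev_end = end
--
--     # Reset to Other after the last range
--     if prev_val != 0:
--         starts.append(prev_end + 1)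
--         values.append(0)
--
--     return starts, values
-- ===== SOURCE B (Python) =====
-- def compress_to_range_starts(
--     ranges: list[tuple[int, int, int]],
-- ) -> tuple[list[int], list[int]]:
--     """Two-phase version: build a raw change-point table, then compress it.
--
--     Phase 1 walks the ranges once (same overlap assert as the original) and
--     records candidate change-points: an Other (0) marker in front of every
--     range that is not adjacent to the previous one, the range's own start,
--     and one trailing Other marker.  Phase 2 is a separate compression pass
--     that keeps only the points whose value differs from the value currently
--     in effect (starting at Other = 0).
--     """
--     # Phase 1: raw candidate change-points, no value bookkeeping at all
--     points: list[tuple[int, int]] = []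
--     prev_end = -1
--     for start, end, val in ranges:
--         assert start > prev_end, f"Overlapping range at U+{start:04X}"
--         if start > prev_end + 1:
--             points.append((prev_end + 1, 0))
--         points.append((start, val))
--         prev_end = end
--     points.append((prev_end + 1, 0))
--
--     # Phase 2: compress — keep a point only if it changes the current value
--     starts: list[int] = []
--     values: list[int] = []
--     cur = 0
--     for pos, v in points:
--         if v != cur:
--             starts.append(pos)
--             values.append(v)
--             cur = v
--     return starts, values
-- ===== Notes on version B (the rewrite author's own statement) =====
-- stated objective: alternative
-- what changed: B replaces A's fused loop with its prev_val bookkeeping and inline gap/final-reset emission by two separate passes: build a raw change-point table (gap markers, range starts, trailing reset) tracking only prev_end, then one compression pass that keeps a point only when its value differs from the value currently in effect.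
import Mathlib
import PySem

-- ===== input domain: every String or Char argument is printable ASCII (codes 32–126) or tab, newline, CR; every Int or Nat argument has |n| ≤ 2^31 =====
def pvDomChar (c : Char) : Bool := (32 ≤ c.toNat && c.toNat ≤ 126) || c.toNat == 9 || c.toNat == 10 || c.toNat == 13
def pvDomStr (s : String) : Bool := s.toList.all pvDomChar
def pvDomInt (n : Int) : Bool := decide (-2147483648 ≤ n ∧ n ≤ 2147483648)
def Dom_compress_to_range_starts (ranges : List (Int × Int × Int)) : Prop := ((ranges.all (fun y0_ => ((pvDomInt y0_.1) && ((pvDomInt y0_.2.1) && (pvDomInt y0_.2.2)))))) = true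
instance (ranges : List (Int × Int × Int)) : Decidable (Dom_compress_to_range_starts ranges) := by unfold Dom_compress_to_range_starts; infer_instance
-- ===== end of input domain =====

-- B builds an explicit intermediate change-point table and compresses it in a second pass,
-- instead of A's fused single loop; proved equal to A on every input where A's assert passes.

-- ===== PORT A =====
-- A's for-loop over (start, end, val) with state (starts, values, prev_val, prev_end);
-- 'none' models the AssertionError raised when start ≤ prev_end (excluded by Pre_).
def aGo (rs : List (Int × Int × Int)) (starts values : List Int) (pv pe : Int) :
    Option (List Int × List Int × Int × Int) :=
  match rs with
  | [] => some (starts, values, pv, pe)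
  | (s, e, v) :: rest =>
    if s > pe then
      -- gap marker after the previous range if needed
      let g := if s > pe + 1 ∧ pv ≠ 0 then (starts ++ [pe + 1], values ++ [(0 : Int)], (0 : Int))
               else (starts, values, pv)
      -- emit a new entry if the value changes
      let h := if v ≠ g.2.2 then (g.1 ++ [s], g.2.1 ++ [v], v) else g
      aGo rest h.1 h.2.1 h.2.2 e
    else none

def compress_to_range_starts (ranges : List (Int × Int × Int)) : List Int × List Int :=
  match aGo ranges [] [] 0 (-1) with
  | some (starts, values, pv, pe) =>
    -- reset to Other after the last range
    if pv ≠ 0 then (starts ++ [pe + 1], values ++ [0]) else (starts, values)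
  | none => ([], [])  -- AssertionError in Python; outside Pre_

-- ===== PORT B =====
-- Phase 1: raw candidate change-points, tracking only prev_end ('none' = AssertionError).
def bPoints (rs : List (Int × Int × Int)) (points : List (Int × Int)) (pe : Int) :
    Option (List (Int × Int) × Int) :=
  match rs with
  | [] => some (points, pe)
  | (s, e, v) :: rest =>
    if s > pe then
      bPoints rest (points ++ (if s > pe + 1 then [(pe + 1, (0 : Int))] else []) ++ [(s, v)]) e
    else none

-- Phase 2: keep a point only if it changes the current value.
def bDedup (pts : List (Int × Int)) (starts values : List Int) (cur : Int) :
    List Int × List Int :=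
  match pts with
  | [] => (starts, values)
  | (p, v) :: rest =>
    if v ≠ cur then bDedup rest (starts ++ [p]) (values ++ [v]) v
    else bDedup rest starts values cur

def compress_to_range_starts_alt (ranges : List (Int × Int × Int)) : List Int × List Int :=
  match bPoints ranges [] (-1) with
  | some (points, pe) => bDedup (points ++ [(pe + 1, 0)]) [] [] 0
  | none => ([], [])  -- AssertionError in Python; outside Pre_

-- ===== PRECONDITION & SPEC =====
-- Pre_ excludes exactly the inputs on which A raises AssertionError ("Overlapping range"):
-- it requires the documented shape — the first start ≥ 0 and each start > the previous range's end.
def Pre_compress_to_range_starts (ranges : List (Int × Int × Int)) : Prop :=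
  List.IsChain (fun x y : Int × Int × Int => y.1 > x.2.1) ((0, -1, 0) :: ranges)
instance (ranges : List (Int × Int × Int)) : Decidable (Pre_compress_to_range_starts ranges) := by
  unfold Pre_compress_to_range_starts; infer_instance

def pvWitness_compress_to_range_starts : (List (Int × Int × Int)) :=
  [(0, 2, 7), (5, 6, 0), (7, 9, 3)]

def Spec_compress_to_range_starts (ranges : List (Int × Int × Int)) (out : List Int × List Int) : Prop := out = compress_to_range_starts_alt ranges
instance (ranges : List (Int × Int × Int)) (out : List Int × List Int) : Decidable (Spec_compress_to_range_starts ranges out) := by unfold Spec_compress_to_range_starts; infer_instance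

-- ===== CLAIM (what is proved, stated in full; the proofs are below) =====
def Claim_equal_compress_to_range_starts : Prop := ∀ (ranges : List (Int × Int × Int)), Dom_compress_to_range_starts ranges → Pre_compress_to_range_starts ranges → Spec_compress_to_range_starts ranges (compress_to_range_starts ranges)

-- ===== LEMMAS AND PROOFS =====

-- the assert chain as a recursive boolean, for the inductions below
def pvChainOk (pe : Int) (rs : List (Int × Int × Int)) : Bool :=
  match rs with
  | [] => true
  | (s, e, _) :: rest => decide (s > pe) && pvChainOk e rest

theorem chain_to_chainOk (rs : List (Int × Int × Int)) :
    ∀ (a : Int × Int × Int), List.IsChain (fun x y : Int × Int × Int => y.1 > x.2.1) (a :: rs) →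
    pvChainOk a.2.1 rs = true := by
  induction rs with
  | nil => intro _ _; rfl
  | cons r rest ih =>
    intro a h
    rw [List.isChain_cons_cons] at h
    simp [pvChainOk, h.1, ih r h.2]

-- the pure value of A's loop under the chain condition
def aPure (rs : List (Int × Int × Int)) (starts values : List Int) (pv pe : Int) :
    List Int × List Int × Int × Int :=
  match rs with
  | [] => (starts, values, pv, pe)
  | (s, e, v) :: rest =>
    let g := if s > pe + 1 ∧ pv ≠ 0 then (starts ++ [pe + 1], values ++ [(0 : Int)], (0 : Int))
             else (starts, values, pv)
    let h := if v ≠ g.2.2 then (g.1 ++ [s], g.2.1 ++ [v], v) else g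
    aPure rest h.1 h.2.1 h.2.2 e

-- the pure points table of B's phase 1 under the chain condition
def pointsOf (rs : List (Int × Int × Int)) (pe : Int) : List (Int × Int) :=
  match rs with
  | [] => []
  | (s, e, v) :: rest => (if s > pe + 1 then [(pe + 1, (0 : Int))] else []) ++ (s, v) :: pointsOf rest e

def lastE (rs : List (Int × Int × Int)) (pe : Int) : Int :=
  match rs with
  | [] => pe
  | (_, e, _) :: rest => lastE rest e

theorem aGo_chain (rs : List (Int × Int × Int)) : ∀ (starts values : List Int) (pv pe : Int),
    pvChainOk pe rs = true → aGo rs starts values pv pe = some (aPure rs starts values pv pe) := by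
  induction rs with
  | nil => intro _ _ _ _ _; rfl
  | cons r rest ih =>
    intro starts values pv pe hch
    obtain ⟨s, e, v⟩ := r
    simp [pvChainOk] at hch
    simp [aGo, aPure, hch.1, ih _ _ _ _ hch.2]

theorem bPoints_chain (rs : List (Int × Int × Int)) : ∀ (acc : List (Int × Int)) (pe : Int),
    pvChainOk pe rs = true → bPoints rs acc pe = some (acc ++ pointsOf rs pe, lastE rs pe) := by
  induction rs with
  | nil => intro acc pe _; simp [bPoints, pointsOf, lastE]
  | cons r rest ih =>
    intro acc pe hch
    obtain ⟨s, e, v⟩ := r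
    simp [pvChainOk] at hch
    simp [bPoints, pointsOf, lastE, hch.1, ih _ _ hch.2]

-- main correspondence: B's compression of the remaining points = A's remaining loop + final reset
theorem main_corr (rs : List (Int × Int × Int)) :
    ∀ (starts values : List Int) (pv pe : Int), pvChainOk pe rs = true →
    bDedup (pointsOf rs pe ++ [(lastE rs pe + 1, 0)]) starts values pv =
      (if (aPure rs starts values pv pe).2.2.1 = 0
       then ((aPure rs starts values pv pe).1, (aPure rs starts values pv pe).2.1)
       else ((aPure rs starts values pv pe).1 ++ [(aPure rs starts values pv pe).2.2.2 + 1],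
             (aPure rs starts values pv pe).2.1 ++ [0])) := by
  induction rs with
  | nil =>
    intro starts values pv pe _
    by_cases h : pv = 0 <;> simp [aPure, pointsOf, lastE, bDedup, h, eq_comm]
  | cons r rest ih =>
    intro starts values pv pe hch
    obtain ⟨s, e, v⟩ := r
    simp [pvChainOk] at hch
    by_cases h1 : s > pe + 1 <;> by_cases h2 : pv = 0 <;>
      [skip; (have h2' : ¬((0:Int) = pv) := fun h => h2 h.symm); skip;
       (have h2' : ¬((0:Int) = pv) := fun h => h2 h.symm)]
    · -- gap point present, current value already 0: point gives no entry on either side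
      by_cases h3 : v = 0 <;>
        simp [aPure, pointsOf, lastE, bDedup, h1, h2, h3, ih _ _ _ _ hch.2]
    · -- gap point present and emitted on both sides
      by_cases h3 : v = 0
      · simp [aPure, pointsOf, lastE, bDedup, h1, h2, h2', h3, ih _ _ _ _ hch.2]
      · simp [aPure, pointsOf, lastE, bDedup, h1, h2, h2', h3, ih _ _ _ _ hch.2]
    · -- adjacent range, current value 0
      by_cases h3 : v = 0 <;>
        simp [aPure, pointsOf, lastE, bDedup, h1, h2, h3, ih _ _ _ _ hch.2]
    · -- adjacent range, current value nonzero
      by_cases h3 : v = pv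
      · simp [aPure, pointsOf, lastE, bDedup, h1, h2, h3, ih _ _ _ _ hch.2]
      · simp [aPure, pointsOf, lastE, bDedup, h1, h2, h3, ih _ _ _ _ hch.2]

-- ===== VERDICT (by name: the statement is the Claim_ definition above) =====
theorem compress_to_range_starts_spec : Claim_equal_compress_to_range_starts := by
  intro ranges _ hpre
  unfold Spec_compress_to_range_starts compress_to_range_starts compress_to_range_starts_alt
  unfold Pre_compress_to_range_starts at hpre
  have hpre : pvChainOk (-1) ranges = true := chain_to_chainOk ranges (0, -1, 0) hpre
  rw [aGo_chain ranges [] [] 0 (-1) hpre, bPoints_chain ranges [] (-1) hpre]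
  have H := main_corr ranges [] [] 0 (-1) hpre
  rcases hA : aPure ranges [] [] 0 (-1) with ⟨st, vl, pv, pe⟩
  rw [hA] at H
  simp only [List.nil_append] at H ⊢
  rw [H]
  by_cases h : pv = 0 <;> simp [h]
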